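-- pv_equiv track=rewrite | github.com/Thope13/Thope_Pogi013 | Prime_Finder.py | prime_id
-- ===== SOURCE A (Python) =====
-- def prime_id(terms):
--     n1 = 1
--     n2 = 3
--     i = 0
--     int(terms)
--     lucas = [1,3]
--     if terms > 1:
--         while i < terms:
--             nth = n1 + n2
--             n1 = n2
--             n2 = nth
--             lucas.append(nth)
--             i+=1
--         if (lucas[terms-1]-1)%terms == 0:
--             return True
--         else:
--             return False
--     else:
--         return False
-- ===== SOURCE B (Python) =====
-- def prime_id(terms):
--     if terms <= 1:
--         return False
--
--     def fib_pair(n):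
--         # (F(n) % terms, F(n+1) % terms) by fast doubling
--         if n == 0:
--             return (0, 1)
--         a, b = fib_pair(n >> 1)
--         c = (a * ((2 * b - a) % terms)) % terms
--         d = (a * a + b * b) % terms
--         if n & 1:
--             return (d, (c + d) % terms)
--         return (c, d)
--
--     a, b = fib_pair(terms)
--     return (2 * b - a) % terms == 1
-- ===== Notes on version B (the rewrite author's own statement) =====
-- stated objective: faster
-- what changed: Replaces the O(terms)-step iterative construction of the whole Lucas list by a recursive fast-doubling computation of the needed Lucas value modulo terms.
import Mathlib
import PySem

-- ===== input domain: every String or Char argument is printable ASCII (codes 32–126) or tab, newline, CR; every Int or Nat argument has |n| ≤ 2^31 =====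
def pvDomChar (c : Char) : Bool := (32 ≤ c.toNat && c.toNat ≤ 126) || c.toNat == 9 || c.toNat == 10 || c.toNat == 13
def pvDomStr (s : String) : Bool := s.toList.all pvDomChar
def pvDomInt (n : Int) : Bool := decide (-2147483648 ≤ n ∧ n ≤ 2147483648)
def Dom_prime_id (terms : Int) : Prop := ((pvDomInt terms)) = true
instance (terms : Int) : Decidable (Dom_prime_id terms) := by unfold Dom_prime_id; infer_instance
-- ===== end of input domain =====

-- B replaces A's O(terms) list of full-size Lucas numbers by O(log terms) fast-doubling steps modulo terms (faster, asymptotic).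

-- ===== PORT A =====
-- the 'while i < terms' loop: state (n1, n2, i, lucas)
def prime_idLoop (n1 n2 i terms : Int) (lucas : List Int) : List Int :=
  if i < terms then
    prime_idLoop n2 (n1 + n2) (i + 1) terms (lucas ++ [n1 + n2])
  else lucas
termination_by (terms - i).toNat
decreasing_by omega

def prime_id (terms : Int) : Bool :=
  let lucas : List Int := [1, 3]
  if terms > 1 then
    let lucas := prime_idLoop 1 3 0 terms lucas
    match PySem.List.pyGet? lucas (terms - 1) with
    | some v => PySem.Int.mod (v - 1) terms == 0
    | none => false  -- unreachable: with terms > 1 the index terms-1 is in range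
  else false

-- ===== PORT B =====
-- fib_pair: (F(n) % terms, F(n+1) % terms) by fast doubling (n ≥ 0, passed as Nat)
def fibPair (m : Int) (n : Nat) : Int × Int :=
  if n = 0 then (0, 1)
  else
    let p := fibPair m (n / 2)
    let a := p.1
    let b := p.2
    let c := PySem.Int.mod (a * (PySem.Int.mod (2 * b - a) m)) m
    let d := PySem.Int.mod (a * a + b * b) m
    if n % 2 = 1 then (d, PySem.Int.mod (c + d) m) else (c, d)
termination_by n
decreasing_by omega

def prime_id_alt (terms : Int) : Bool :=
  if terms ≤ 1 then false
  else
    let p := fibPair terms terms.toNat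
    PySem.Int.mod (2 * p.2 - p.1) terms == 1

-- ===== PRECONDITION & SPEC =====
def Spec_prime_id (terms : Int) (out : Bool) : Prop := out = prime_id_alt terms
instance (terms : Int) (out : Bool) : Decidable (Spec_prime_id terms out) := by unfold Spec_prime_id; infer_instance

-- ===== CLAIM (what is proved, stated in full; the proofs are below) =====
def Claim_equal_prime_id : Prop := ∀ (terms : Int), Dom_prime_id terms → Spec_prime_id terms (prime_id terms)

-- ===== LEMMAS AND PROOFS =====

-- the Lucas numbers, as integers
def luc : Nat → Int
  | 0 => 2
  | 1 => 1
  | n + 2 => luc n + luc (n + 1)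

theorem luc_add_two (n : Nat) : luc (n + 2) = luc n + luc (n + 1) := rfl

theorem luc_eq_fib (n : Nat) : luc n = 2 * (Nat.fib (n + 1) : Int) - (Nat.fib n : Int) := by
  induction n using Nat.strong_induction_on with
  | _ n ih =>
    match n with
    | 0 => simp [luc]
    | 1 => simp [luc]
    | n + 2 =>
      rw [luc_add_two, ih n (by omega), ih (n + 1) (by omega)]
      rw [Nat.fib_add_two (n := n + 1), Nat.fib_add_two (n := n)]
      push_cast
      ring

theorem loop_eq (d : Nat) : ∀ (i terms : Int) (j : Nat) (L : List Int),
    (terms - i).toNat = d →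
    prime_idLoop (luc (j + 1)) (luc (j + 2)) i terms L
      = L ++ (List.range' (j + 3) d).map luc := by
  induction d with
  | zero =>
    intro i terms j L hd
    rw [prime_idLoop]
    simp only [if_neg (by omega : ¬ i < terms)]
    simp
  | succ d ih =>
    intro i terms j L hd
    rw [prime_idLoop]
    simp only [if_pos (by omega : i < terms)]
    have h1 : luc (j + 1) + luc (j + 2) = luc (j + 3) := (luc_add_two (j + 1)).symm
    rw [h1]
    have := ih (i + 1) terms (j + 1) (L ++ [luc (j + 3)]) (by omega)
    simp only [show j + 1 + 1 = j + 2 from rfl, show j + 1 + 2 = j + 3 from rfl] at this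
    rw [this, List.range'_succ]
    simp [show j + 1 + 3 = j + 3 + 1 by omega]

theorem fibPair_eq (m : Int) (hm : 2 ≤ m) (n : Nat) :
    fibPair m n = ((Nat.fib n : Int) % m, (Nat.fib (n + 1) : Int) % m) := by
  induction n using Nat.strong_induction_on with
  | _ n ih =>
    rw [fibPair]
    by_cases h0 : n = 0
    · subst h0
      have h1 : (1 : Int) % m = 1 := Int.emod_eq_of_lt (by omega) (by omega)
      simp [Nat.fib, h1]
    · simp only [if_neg h0, ih (n / 2) (by omega)]
      have hmod : ∀ a : Int, PySem.Int.mod a m = a % m := fun a =>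
        PySem.Int.mod_eq_emod_of_pos (by omega)
      have key : ∀ a : Int, Int.ModEq m (a % m) a := fun a =>
        Int.emod_emod_of_dvd a dvd_rfl
      set k := n / 2 with hk
      set A : Int := (Nat.fib k : Int)
      set B : Int := (Nat.fib (k + 1) : Int)
      have inner : Int.ModEq m (2 * (B % m) - A % m) (2 * B - A) :=
        ((Int.ModEq.refl 2).mul (key B)).sub (key A)
      have hc : (A % m * ((2 * (B % m) - A % m) % m)) % m = (A * (2 * B - A)) % m :=
        (key A).mul ((key _).trans inner)
      have hd : (A % m * (A % m) + B % m * (B % m)) % m = (A * A + B * B) % m :=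
        ((key A).mul (key A)).add ((key B).mul (key B))
      have hfib2k : (Nat.fib (2 * k) : Int) = A * (2 * B - A) := by
        have hle : Nat.fib k ≤ 2 * Nat.fib (k + 1) :=
          le_trans (Nat.fib_le_fib_succ) (by omega)
        have h2 := Nat.fib_two_mul k
        have h3 : (Nat.fib (2 * k) : Int)
            = (Nat.fib k : Int) * (2 * (Nat.fib (k + 1) : Int) - Nat.fib k) := by
          rw [h2]; push_cast [hle]; ring
        simpa [A, B, mul_comm] using h3
      have hfib2k1 : (Nat.fib (2 * k + 1) : Int) = A * A + B * B := by
        have h2 := Nat.fib_two_mul_add_one k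
        rw [h2]; push_cast [pow_two]; ring
      by_cases hodd : n % 2 = 1
      · have hn : n = 2 * k + 1 := by omega
        simp only [if_pos hodd, hmod, hc, hd]
        rw [← hfib2k, ← hfib2k1, ← Int.add_emod]
        have h2 : (Nat.fib (2 * k) : Int) + (Nat.fib (2 * k + 1) : Int)
            = (Nat.fib (2 * k + 2) : Int) := by
          rw [Nat.fib_add_two]; push_cast; ring
        rw [h2, hn]
      · have hn : n = 2 * k := by omega
        simp only [if_neg hodd, hmod, hc, hd]
        rw [← hfib2k, ← hfib2k1, hn]

theorem luc_val (terms : Int) (h : 1 < terms) :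
    ∃ v, PySem.List.pyGet? (prime_idLoop 1 3 0 terms [1, 3]) (terms - 1) = some v ∧
      v = luc terms.toNat := by
  have hloop := loop_eq (terms - 0).toNat 0 terms 0 [luc 1, luc 2] rfl
  simp only [show (0 : Nat) + 1 = 1 from rfl, show (0 : Nat) + 2 = 2 from rfl,
    show (0 : Nat) + 3 = 3 from rfl] at hloop
  rw [show prime_idLoop 1 3 0 terms [1, 3]
      = prime_idLoop (luc 1) (luc 2) 0 terms [luc 1, luc 2] by norm_num [luc], hloop]
  have hlist : ([luc 1, luc 2] ++ (List.range' 3 (terms - 0).toNat).map luc)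
      = (List.range' 1 ((terms - 0).toNat + 2)).map luc := by
    rw [show (terms - 0).toNat + 2 = ((terms - 0).toNat + 1) + 1 by omega,
      List.range'_succ, List.range'_succ]
    simp
  rw [hlist, show terms - 1 = (((terms - 1).toNat : Nat) : Int) by omega,
    PySem.List.pyGet?_natCast, List.getElem?_eq_getElem (by simp; omega)]
  refine ⟨_, rfl, ?_⟩
  simp only [List.getElem_map, List.getElem_range']
  congr 1
  omega

theorem prime_id_eq (terms : Int) : prime_id terms = prime_id_alt terms := by
  by_cases h : 1 < terms
  · obtain ⟨v, hget, hv⟩ := luc_val terms h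
    rw [prime_id, prime_id_alt]
    simp only [if_pos h, if_neg (by omega : ¬ terms ≤ 1), hget]
    rw [fibPair_eq terms (by omega) terms.toNat]
    have hmod : ∀ a : Int, PySem.Int.mod a terms = a % terms := fun a =>
      PySem.Int.mod_eq_emod_of_pos (by omega)
    have key : ∀ a : Int, Int.ModEq terms (a % terms) a := fun a =>
      Int.emod_emod_of_dvd a dvd_rfl
    rw [hmod, hmod, hv]
    have hl : (2 * ((Nat.fib (terms.toNat + 1) : Int) % terms)
          - (Nat.fib terms.toNat : Int) % terms) % terms
        = luc terms.toNat % terms := by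
      have : Int.ModEq terms
          (2 * ((Nat.fib (terms.toNat + 1) : Int) % terms) - (Nat.fib terms.toNat : Int) % terms)
          (2 * (Nat.fib (terms.toNat + 1) : Int) - (Nat.fib terms.toNat : Int)) :=
        ((Int.ModEq.refl 2).mul (key _)).sub (key _)
      rw [this, ← luc_eq_fib]
    rw [hl]
    have hz : ((luc terms.toNat - 1) % terms = 0) ↔ (luc terms.toNat % terms = 1) := by
      rw [PySem.Int.emod_eq_zero_iff_dvd, ← Int.modEq_iff_dvd,
        show (1 : Int) ≡ luc terms.toNat [ZMOD terms] ↔ (1 : Int) % terms = luc terms.toNat % terms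
          from Iff.rfl,
        Int.emod_eq_of_lt (by omega) (by omega)]
      exact ⟨fun h => h.symm, fun h => h.symm⟩
    rw [Bool.eq_iff_iff]
    simp only [beq_iff_eq]
    exact hz
  · rw [prime_id, prime_id_alt]
    simp only [if_neg (by omega : ¬ terms > 1), if_pos (by omega : terms ≤ 1)]

-- ===== VERDICT (by name: the statement is the Claim_ definition above) =====
theorem prime_id_spec : Claim_equal_prime_id := by
  intro terms _
  exact prime_id_eq terms
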